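-- pv_equiv track=rewrite | github.com/wuhenxiansen/pycharmCode | FCM/fcmcase.py | evaluate
-- ===== SOURCE A (Python) =====
-- def evaluate(y, t):
--     a, b, c, d = [0 for i in range(4)]
--     for i in range(len(y)):
--         for j in range(i + 1, len(y)):
--             if y[i] == y[j] and t[i] == t[j]:
--                 a += 1
--             elif y[i] == y[j] and t[i] != t[j]:
--                 b += 1
--             elif y[i] != y[j] and t[i] == t[j]:
--                 c += 1
--             elif y[i] != y[j] and t[i] != t[j]:
--                 d += 1
--     return a, b, c, d
-- ===== SOURCE B (Python) =====
-- def evaluate(y, t):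
--     a = b = c = d = 0
--     cy = {}
--     ct = {}
--     cyt = {}
--     for i in range(len(y)):
--         yi = y[i]
--         ti = t[i]
--         sy = cy.get(yi, 0)
--         st = ct.get(ti, 0)
--         syt = cyt.get((yi, ti), 0)
--         a += syt
--         b += sy - syt
--         c += st - syt
--         d += i - sy - st + syt
--         cy[yi] = sy + 1
--         ct[ti] = st + 1
--         cyt[(yi, ti)] = syt + 1
--     return a, b, c, d
-- ===== Notes on version B (the rewrite author's own statement) =====
-- stated objective: faster
-- what changed: Replaces the O(n^2) double loop over all index pairs by a single pass that keeps hash-map counters of the labels seen so far and adds, for each element, the number of earlier agreeing/disagreeing partners in O(1).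
-- outside the precondition, e.g. on evaluate([5], []): A returns (0, 0, 0, 0), B raises IndexError
import Mathlib
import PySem

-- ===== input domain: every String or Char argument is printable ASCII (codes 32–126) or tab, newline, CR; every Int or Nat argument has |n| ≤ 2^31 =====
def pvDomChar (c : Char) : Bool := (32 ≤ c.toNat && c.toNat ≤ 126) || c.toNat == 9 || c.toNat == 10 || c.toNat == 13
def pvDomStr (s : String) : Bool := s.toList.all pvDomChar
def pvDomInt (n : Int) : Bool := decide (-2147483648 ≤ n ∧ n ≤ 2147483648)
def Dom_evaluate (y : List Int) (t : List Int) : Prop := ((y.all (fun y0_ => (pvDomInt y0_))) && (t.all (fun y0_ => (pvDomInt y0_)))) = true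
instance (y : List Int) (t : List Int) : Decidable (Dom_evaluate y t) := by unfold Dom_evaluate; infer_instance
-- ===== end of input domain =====

-- B replaces A's O(n^2) pair loop by one pass with hash-map counters of the labels seen so far (objective: faster, asymptotic).

-- ===== PORT A =====
-- literal port of A's double index loop; pyGetD is exact here: Pre_ keeps every index in range
def evaluate (y : List Int) (t : List Int) : List Int :=
  let n : Int := (y.length : Int)
  let r : Int × Int × Int × Int :=
    (PySem.List.pyRange 0 n 1).foldl (fun st i =>
      (PySem.List.pyRange (i + 1) n 1).foldl (fun st j =>
        let yi := PySem.List.pyGetD y i 0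
        let yj := PySem.List.pyGetD y j 0
        let ti := PySem.List.pyGetD t i 0
        let tj := PySem.List.pyGetD t j 0
        if yi = yj ∧ ti = tj then (st.1 + 1, st.2.1, st.2.2.1, st.2.2.2)
        else if yi = yj ∧ ti ≠ tj then (st.1, st.2.1 + 1, st.2.2.1, st.2.2.2)
        else if yi ≠ yj ∧ ti = tj then (st.1, st.2.1, st.2.2.1 + 1, st.2.2.2)
        else if yi ≠ yj ∧ ti ≠ tj then (st.1, st.2.1, st.2.2.1, st.2.2.2 + 1)
        else st) st) ((0 : Int), (0 : Int), (0 : Int), (0 : Int))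
  [r.1, r.2.1, r.2.2.1, r.2.2.2]

-- ===== PORT B =====
-- literal port of Source B: one pass, three dicts counting earlier y-labels, t-labels and joint labels
def evaluate_alt (y : List Int) (t : List Int) : List Int :=
  let r :=
    (PySem.List.pyRange 0 (y.length : Int) 1).foldl
      (fun (s : (Int × Int × Int × Int) × PySem.Dict Int Int × PySem.Dict Int Int × PySem.Dict (Int × Int) Int) i =>
        let yi := PySem.List.pyGetD y i 0
        let ti := PySem.List.pyGetD t i 0
        let sy := s.2.1.getD yi 0
        let st := s.2.2.1.getD ti 0
        let syt := s.2.2.2.getD (yi, ti) 0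
        ((s.1.1 + syt, s.1.2.1 + (sy - syt), s.1.2.2.1 + (st - syt), s.1.2.2.2 + (i - sy - st + syt)),
         s.2.1.insert yi (sy + 1), s.2.2.1.insert ti (st + 1), s.2.2.2.insert (yi, ti) (syt + 1)))
      (((0 : Int), (0 : Int), (0 : Int), (0 : Int)), PySem.Dict.empty, PySem.Dict.empty, PySem.Dict.empty)
  [r.1.1, r.1.2.1, r.1.2.2.1, r.1.2.2.2]

-- ===== PRECONDITION & SPEC =====
-- Pre_ excludes inputs with len(t) < len(y): there A raises IndexError on t, except in the degenerate
-- case len(y) <= 1 where A returns (0,0,0,0) only because no pair exists and t is never touched; B raises there.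
def Pre_evaluate (y : List Int) (t : List Int) : Prop := y.length ≤ t.length
instance (y : List Int) (t : List Int) : Decidable (Pre_evaluate y t) := by unfold Pre_evaluate; infer_instance
def pvWitness_evaluate : List Int × List Int := ([1, 1, 2], [1, 2, 2])

def Spec_evaluate (y : List Int) (t : List Int) (out : List Int) : Prop := out = evaluate_alt y t
instance (y : List Int) (t : List Int) (out : List Int) : Decidable (Spec_evaluate y t out) := by unfold Spec_evaluate; infer_instance

-- ===== CLAIM (what is proved, stated in full; the proofs are below) =====
def Claim_equal_evaluate : Prop := ∀ (y : List Int) (t : List Int), Dom_evaluate y t → Pre_evaluate y t → Spec_evaluate y t (evaluate y t)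

-- ===== LEMMAS AND PROOFS =====

-- the 0/1 contribution vector of an index pair (earlier element p, later element q)
def pvVec (p q : Int × Int) : Int × Int × Int × Int :=
  (if p.1 = q.1 ∧ p.2 = q.2 then 1 else 0,
   if p.1 = q.1 ∧ p.2 ≠ q.2 then 1 else 0,
   if p.1 ≠ q.1 ∧ p.2 = q.2 then 1 else 0,
   if p.1 ≠ q.1 ∧ p.2 ≠ q.2 then 1 else 0)

-- canonical pair count, grouped by the earlier element
def pvP : List (Int × Int) → Int × Int × Int × Int
  | [] => (0, 0, 0, 0)
  | x :: r => (r.map (pvVec x)).sum + pvP r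

-- A's inner-loop body, on pair values
def pvStepA (p q : Int × Int) (st : Int × Int × Int × Int) : Int × Int × Int × Int :=
  if p.1 = q.1 ∧ p.2 = q.2 then (st.1 + 1, st.2.1, st.2.2.1, st.2.2.2)
  else if p.1 = q.1 ∧ p.2 ≠ q.2 then (st.1, st.2.1 + 1, st.2.2.1, st.2.2.2)
  else if p.1 ≠ q.1 ∧ p.2 = q.2 then (st.1, st.2.1, st.2.2.1 + 1, st.2.2.2)
  else if p.1 ≠ q.1 ∧ p.2 ≠ q.2 then (st.1, st.2.1, st.2.2.1, st.2.2.2 + 1)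
  else st

-- outer-loop shape: element at i together with the suffix after i
def pvPairFold {α S : Type} (h : S → α → List α → S) : List α → S → S
  | [], st => st
  | x :: r, st => pvPairFold h r (h st x r)

lemma pvStepA_eq_add (p q : Int × Int) (st : Int × Int × Int × Int) :
    pvStepA p q st = st + pvVec p q := by
  unfold pvStepA pvVec
  split_ifs with h1 h2 h3 h4 <;> simp [Prod.ext_iff] <;> tauto

lemma pv_innerA (p : Int × Int) (rest : List (Int × Int)) (st : Int × Int × Int × Int) :
    rest.foldl (fun st q => pvStepA p q st) st = st + (rest.map (pvVec p)).sum := by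
  induction rest generalizing st with
  | nil => simp
  | cons q r ih =>
    rw [List.foldl_cons, pvStepA_eq_add, ih, List.map_cons, List.sum_cons, add_assoc]

-- generic: the index double-loop shape equals pvPairFold
lemma pv_foldl_range_body {α S : Type} (d : α) (h : S → α → List α → S) :
    ∀ (l : List α) (init : S),
      (PySem.List.pyRange 0 (l.length : Int) 1).foldl
        (fun st i => h st (PySem.List.pyGetD l i d) (l.drop (i.toNat + 1))) init
      = pvPairFold h l init := by
  intro l
  induction l with
  | nil => intro init; simp [PySem.List.pyRange_one_eq_nil, pvPairFold]
  | cons x r ih =>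
    intro init
    have hb : (0:Int) < (((x :: r).length : Int)) := by simp
    rw [PySem.List.pyRange_one_cons hb, List.foldl_cons, pvPairFold]
    have hfirst : h init (PySem.List.pyGetD (x :: r) 0 d) ((x :: r).drop ((0:Int).toNat + 1)) = h init x r := by
      simp [PySem.List.pyGetD_ofNat']
    have hshift : ∀ (st : S),
        (PySem.List.pyRange (0+1) (((x :: r).length : Int)) 1).foldl
          (fun st i => h st (PySem.List.pyGetD (x :: r) i d) ((x :: r).drop (i.toNat + 1))) st
        = (PySem.List.pyRange 0 ((r.length : Int)) 1).foldl
          (fun st i => h st (PySem.List.pyGetD r i d) (r.drop (i.toNat + 1))) st := by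
      intro st
      rw [PySem.List.pyRange_one, PySem.List.pyRange_one]
      have e1 : ((((x :: r).length : Int)) - (0+1)).toNat = r.length := by simp
      have e2 : (((r.length : Int)) - 0).toNat = r.length := by simp
      rw [e1, e2, List.foldl_map, List.foldl_map]
      apply PySem.List.foldl_congr_mem
      intro acc k hk
      have e3 : ((0:Int) + 1 + (k : Int)) = (((k + 1 : Nat)) : Int) := by push_cast; ring
      have e4 : ((0:Int) + (k : Int)) = ((k : Nat) : Int) := by norm_num
      rw [e3, e4, PySem.List.pyGetD_natCast, PySem.List.pyGetD_natCast]
      simp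
    show _ = pvPairFold h r (h init x r)
    rw [hfirst, hshift, ih]

-- B's state and step, on enumerated pair values
abbrev PvState := (Int × Int × Int × Int) × PySem.Dict Int Int × PySem.Dict Int Int × PySem.Dict (Int × Int) Int

def pvStepB (s : PvState) (q : Int × (Int × Int)) : PvState :=
  let sy := s.2.1.getD q.2.1 0
  let st := s.2.2.1.getD q.2.2 0
  let syt := s.2.2.2.getD q.2 0
  ((s.1.1 + syt, s.1.2.1 + (sy - syt), s.1.2.2.1 + (st - syt), s.1.2.2.2 + (q.1 - sy - st + syt)),
   s.2.1.insert q.2.1 (sy + 1), s.2.2.1.insert q.2.2 (st + 1), s.2.2.2.insert q.2 (syt + 1))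

-- the counting-dict loop 'd[k] = d.get(k, 0) + 1'
def pvCIns {κ : Type} [BEq κ] (xs : List κ) : PySem.Dict κ Int :=
  xs.foldl (fun d x => d.insert x (d.getD x 0 + 1)) PySem.Dict.empty

lemma pvCIns_append {κ : Type} [BEq κ] (xs : List κ) (v : κ) :
    pvCIns (xs ++ [v]) = (pvCIns xs).insert v ((pvCIns xs).getD v 0 + 1) := by
  simp [pvCIns]

lemma pv_pairFold_eq_P (l : List (Int × Int)) (st : Int × Int × Int × Int) :
    pvPairFold (fun st x rest => rest.foldl (fun st q => pvStepA x q st) st) l st = st + pvP l := by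
  induction l generalizing st with
  | nil => simp [pvPairFold, pvP]
  | cons x r ih =>
    rw [pvPairFold, pv_innerA, ih, pvP, add_assoc]

lemma pv_sumVec (l : List (Int × Int)) (x : Int × Int) :
    (l.map (pvVec · x)).sum =
      ((l.count x : Int),
       ((l.map Prod.fst).count x.1 : Int) - (l.count x : Int),
       ((l.map Prod.snd).count x.2 : Int) - (l.count x : Int),
       (l.length : Int) - ((l.map Prod.fst).count x.1 : Int) - ((l.map Prod.snd).count x.2 : Int) + (l.count x : Int)) := by
  induction l with
  | nil => simp [Prod.ext_iff]
  | cons u r ih =>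
    rw [List.map_cons, List.sum_cons, ih]
    obtain ⟨u1, u2⟩ := u
    obtain ⟨x1, x2⟩ := x
    by_cases h1 : u1 = x1 <;> by_cases h2 : u2 = x2 <;>
      simp [pvVec, h1, h2, Prod.ext_iff, Prod.mk_add_mk] <;> omega

lemma pv_P_append (l : List (Int × Int)) (x : Int × Int) :
    pvP (l ++ [x]) = pvP l + (l.map (pvVec · x)).sum := by
  induction l with
  | nil => simp [pvP]
  | cons u r ih =>
    simp [pvP, ih]
    abel

lemma pv_B_inv (l : List (Int × Int)) :
    (PySem.List.enumerate l 0).foldl pvStepB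
      (((0 : Int), (0 : Int), (0 : Int), (0 : Int)), PySem.Dict.empty, PySem.Dict.empty, PySem.Dict.empty)
    = (pvP l, pvCIns (l.map Prod.fst), pvCIns (l.map Prod.snd), pvCIns l) := by
  induction l using List.reverseRecOn with
  | nil => simp [pvP, pvCIns]
  | append_singleton l x ih =>
    rw [PySem.List.enumerate_append, List.foldl_append, ih]
    have hget : ∀ {κ : Type} [BEq κ] [LawfulBEq κ] (xs : List κ) (v : κ),
        (pvCIns xs).getD v 0 = (xs.count v : Int) := by
      intro κ _ _ xs v
      rw [pvCIns, PySem.Dict.getD_foldl_insert_add_one]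
      simp
    simp only [PySem.List.enumerate_cons, PySem.List.enumerate_nil, List.foldl_cons, List.foldl_nil]
    rw [pvStepB]
    simp only [hget]
    refine Prod.ext ?_ (Prod.ext ?_ (Prod.ext ?_ ?_))
    · rw [pv_P_append, pv_sumVec]
      simp only [Prod.ext_iff, Prod.fst_add, Prod.snd_add]
      and_intros <;> push_cast <;> ring
    · simp [List.map_append, pvCIns_append, hget]
    · simp [List.map_append, pvCIns_append, hget]
    · simp [pvCIns_append, hget]

theorem evaluate_spec : Claim_equal_evaluate := by
  intro y t hdom hpre
  unfold Spec_evaluate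
  unfold Pre_evaluate at hpre
  have hlen : (y.zip t).length = y.length := by
    rw [List.length_zip]; omega
  have hcast : ((y.length : Int)) = (((y.zip t).length : Int)) := by exact_mod_cast hlen.symm
  -- pointwise: zip lookup is the pair of lookups
  have hget : ∀ (j : Int), 0 ≤ j → j < (y.length : Int) →
      PySem.List.pyGetD (y.zip t) j ((0:Int), (0:Int)) = (PySem.List.pyGetD y j 0, PySem.List.pyGetD t j 0) := by
    intro j h0 hj
    have hjy : j.toNat < y.length := by omega
    have hjt : j.toNat < t.length := by omega
    have hjz : j.toNat < (y.zip t).length := by omega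
    rw [PySem.List.pyGetD_eq_getElem _ _ h0 (by omega),
        PySem.List.pyGetD_eq_getElem _ _ h0 (by omega),
        PySem.List.pyGetD_eq_getElem _ _ h0 (by omega)]
    exact List.getElem_zip ..
  -- A's fold equals the canonical pair count
  have hA : (PySem.List.pyRange 0 ((y.length : Int)) 1).foldl (fun st i =>
      (PySem.List.pyRange (i + 1) ((y.length : Int)) 1).foldl (fun st j =>
        let yi := PySem.List.pyGetD y i 0
        let yj := PySem.List.pyGetD y j 0
        let ti := PySem.List.pyGetD t i 0
        let tj := PySem.List.pyGetD t j 0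
        if yi = yj ∧ ti = tj then (st.1 + 1, st.2.1, st.2.2.1, st.2.2.2)
        else if yi = yj ∧ ti ≠ tj then (st.1, st.2.1 + 1, st.2.2.1, st.2.2.2)
        else if yi ≠ yj ∧ ti = tj then (st.1, st.2.1, st.2.2.1 + 1, st.2.2.2)
        else if yi ≠ yj ∧ ti ≠ tj then (st.1, st.2.1, st.2.2.1, st.2.2.2 + 1)
        else st) st) ((0 : Int), (0 : Int), (0 : Int), (0 : Int))
      = pvP (y.zip t) := by
    rw [PySem.List.foldl_congr_mem _ _
        (fun st i => ((y.zip t).drop (i.toNat + 1)).foldl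
          (fun st q => pvStepA (PySem.List.pyGetD (y.zip t) i ((0:Int),(0:Int))) q st) st) _ ?_]
    · rw [hcast]
      have hbody := pv_foldl_range_body ((0:Int),(0:Int))
        (fun st x rest => List.foldl (fun st q => pvStepA x q st) st rest)
        (y.zip t) (((0:Int),(0:Int),(0:Int),(0:Int)))
      beta_reduce at hbody
      rw [hbody, pv_pairFold_eq_P]
      simp [Prod.ext_iff]
    · intro st i hi
      rw [PySem.List.mem_pyRange_one] at hi
      obtain ⟨hi0, hin⟩ := hi
      have hinner : (PySem.List.pyRange (i + 1) ((y.length : Int)) 1).foldl (fun st j =>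
            let yi := PySem.List.pyGetD y i 0
            let yj := PySem.List.pyGetD y j 0
            let ti := PySem.List.pyGetD t i 0
            let tj := PySem.List.pyGetD t j 0
            if yi = yj ∧ ti = tj then (st.1 + 1, st.2.1, st.2.2.1, st.2.2.2)
            else if yi = yj ∧ ti ≠ tj then (st.1, st.2.1 + 1, st.2.2.1, st.2.2.2)
            else if yi ≠ yj ∧ ti = tj then (st.1, st.2.1, st.2.2.1 + 1, st.2.2.2)
            else if yi ≠ yj ∧ ti ≠ tj then (st.1, st.2.1, st.2.2.1, st.2.2.2 + 1)
            else st) st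
          = (PySem.List.pyRange (i + 1) ((y.length : Int)) 1).foldl (fun st j =>
              pvStepA (PySem.List.pyGetD y i 0, PySem.List.pyGetD t i 0)
                (PySem.List.pyGetD (y.zip t) j ((0:Int),(0:Int))) st) st := by
        apply PySem.List.foldl_congr_mem
        intro acc j hj
        rw [PySem.List.mem_pyRange_one] at hj
        rw [hget j (by omega) (by omega)]
        rfl
      rw [hinner, hcast]
      have hdrop := PySem.List.foldl_pyRange_pyGetD' (y.zip t) ((0:Int),(0:Int))
        (fun acc q => pvStepA (PySem.List.pyGetD y i 0, PySem.List.pyGetD t i 0) q acc) st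
        (a := i + 1) (by omega)
      beta_reduce at hdrop
      beta_reduce
      rw [hdrop, hget i hi0 hin]
      have htn : (i + 1).toNat = i.toNat + 1 := by omega
      rw [htn]
  -- B's fold equals the invariant
  have hB : (PySem.List.pyRange 0 ((y.length : Int)) 1).foldl
      (fun (s : (Int × Int × Int × Int) × PySem.Dict Int Int × PySem.Dict Int Int × PySem.Dict (Int × Int) Int) i =>
        let yi := PySem.List.pyGetD y i 0
        let ti := PySem.List.pyGetD t i 0
        let sy := s.2.1.getD yi 0
        let st := s.2.2.1.getD ti 0
        let syt := s.2.2.2.getD (yi, ti) 0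
        ((s.1.1 + syt, s.1.2.1 + (sy - syt), s.1.2.2.1 + (st - syt), s.1.2.2.2 + (i - sy - st + syt)),
         s.2.1.insert yi (sy + 1), s.2.2.1.insert ti (st + 1), s.2.2.2.insert (yi, ti) (syt + 1)))
      (((0 : Int), (0 : Int), (0 : Int), (0 : Int)), PySem.Dict.empty, PySem.Dict.empty, PySem.Dict.empty)
      = (pvP (y.zip t), pvCIns ((y.zip t).map Prod.fst), pvCIns ((y.zip t).map Prod.snd), pvCIns (y.zip t)) := by
    rw [PySem.List.foldl_congr_mem _ _
        (fun s i => pvStepB s (i, PySem.List.pyGetD (y.zip t) i ((0:Int),(0:Int)))) _ ?_]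
    · rw [hcast]
      have hm := List.foldl_map (f := fun j => (j, PySem.List.pyGetD (y.zip t) j ((0:Int),(0:Int))))
        (g := pvStepB)
        (l := PySem.List.pyRange 0 (((y.zip t).length : Int)) 1)
        (init := ((((0:Int),(0:Int),(0:Int),(0:Int)), PySem.Dict.empty, PySem.Dict.empty, PySem.Dict.empty) : PvState))
      beta_reduce at hm
      have he : PySem.List.enumerate (y.zip t) 0
          = List.map (fun j => (j, PySem.List.pyGetD (y.zip t) j ((0:Int),(0:Int))))
            (PySem.List.pyRange 0 (((y.zip t).length : Int)) 1) := by
        rw [PySem.List.enumerate_eq_map_pyRange (y.zip t) ((0:Int),(0:Int))]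
        simp
      rw [← hm, ← he]
      exact pv_B_inv (y.zip t)
    · intro s i hi
      rw [PySem.List.mem_pyRange_one] at hi
      show _ = pvStepB s (i, PySem.List.pyGetD (y.zip t) i ((0:Int),(0:Int)))
      rw [hget i hi.1 hi.2]
      rfl
  show evaluate y t = evaluate_alt y t
  rw [evaluate, evaluate_alt]
  simp only [hA, hB]
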